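-- pv_equiv track=rewrite | github.com/zbrandt/cs61a | ex.py | partition_gen
-- ===== SOURCE A (Python) =====
-- def partition_gen(n, m):
--     assert n > 0 and m > 0
--     if n == m:
--         yield str(n)
--     if n - m > 0:
--         yield str(n - m) + next(partition_gen(n - m, m))
--     if m > 1:
--         yield next(partition_gen(n, m - 1))
-- ===== SOURCE B (Python) =====
-- def _first(n, m):
--     # first value partition_gen(n, m) would yield, computed by a flat loop
--     s = ""
--     while n > m:
--         n -= m
--         s += str(n)
--     return s + str(n)
--
-- def partition_gen(n, m):
--     assert n > 0 and m > 0
--     out = []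
--     d = n - m
--     if d == 0:
--         out.append(str(n))
--     if d > 0:
--         out.append(str(d) + _first(d, m))
--     if m > 1:
--         out.append(_first(n, m - 1))
--     yield from out
-- ===== Notes on version B (the rewrite author's own statement) =====
-- stated objective: simpler
-- what changed: Every next(partition_gen(...)) call is replaced by a flat iterative helper _first(n, m) (a while-loop with a string accumulator) that computes the first-yielded string directly, removing the recursive-generator/next machinery.
import Mathlib
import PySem

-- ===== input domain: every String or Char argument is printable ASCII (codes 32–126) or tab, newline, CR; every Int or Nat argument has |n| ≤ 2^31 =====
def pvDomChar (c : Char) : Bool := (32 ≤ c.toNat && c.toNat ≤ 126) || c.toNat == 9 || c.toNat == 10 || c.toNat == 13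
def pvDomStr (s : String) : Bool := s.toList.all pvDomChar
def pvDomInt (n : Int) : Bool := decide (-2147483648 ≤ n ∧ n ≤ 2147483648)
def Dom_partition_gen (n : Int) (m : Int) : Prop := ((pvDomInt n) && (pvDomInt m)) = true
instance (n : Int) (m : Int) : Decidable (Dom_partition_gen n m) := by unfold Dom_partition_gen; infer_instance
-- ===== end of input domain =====

-- B replaces A's recursive next(partition_gen(...)) calls by a flat while-loop helper; objective: simpler.
-- Both ports return the list of all values the Python generator yields (lazily: next() computes only the first yield).

-- ===== PORT A =====
-- first yield of A's generator partition_gen(n, m), i.e. what next(partition_gen(n, m)) returns;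
-- the fuel only makes the recursion total (under Pre_ it never runs out).
def pvFirstA (fuel : Nat) (n : Int) (m : Int) : String :=
  match fuel with
  | 0 => ""
  | fuel + 1 =>
    if n = m then PySem.Int.toStr n
    else if n - m > 0 then PySem.Int.toStr (n - m) ++ pvFirstA fuel (n - m) m
    else pvFirstA fuel n (m - 1)

def partition_gen (n : Int) (m : Int) : List String :=
  -- assert n > 0 and m > 0: Pre_ excludes the AssertionError inputs
  (if n = m then [PySem.Int.toStr n] else []) ++
  (if n - m > 0 then [PySem.Int.toStr (n - m) ++ pvFirstA ((n - m) + m).toNat (n - m) m] else []) ++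
  (if m > 1 then [pvFirstA (n + (m - 1)).toNat n (m - 1)] else [])

-- ===== PORT B =====
-- B's _first: while n > m: n -= m; s += str(n); return s + str(n).  Fuel bounds the iteration count.
def pvFirstLoop (fuel : Nat) (n : Int) (m : Int) (s : String) : String :=
  match fuel with
  | 0 => s ++ PySem.Int.toStr n
  | fuel + 1 =>
    if n > m then pvFirstLoop fuel (n - m) m (s ++ PySem.Int.toStr (n - m))
    else s ++ PySem.Int.toStr n

def pvFirstB (n : Int) (m : Int) : String := pvFirstLoop n.toNat n m ""

def partition_gen_alt (n : Int) (m : Int) : List String :=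
  let d := n - m
  (if d = 0 then [PySem.Int.toStr n] else []) ++
  (if d > 0 then [PySem.Int.toStr d ++ pvFirstB d m] else []) ++
  (if m > 1 then [pvFirstB n (m - 1)] else [])

-- ===== PRECONDITION & SPEC =====
-- Pre_: exactly the inputs on which A's assert passes (otherwise Python raises AssertionError).
def Pre_partition_gen (n : Int) (m : Int) : Prop := 0 < n ∧ 0 < m
instance (n : Int) (m : Int) : Decidable (Pre_partition_gen n m) := by unfold Pre_partition_gen; infer_instance
def pvWitness_partition_gen : Int × Int := (7, 3)

def Spec_partition_gen (n : Int) (m : Int) (out : List String) : Prop := out = partition_gen_alt n m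
instance (n : Int) (m : Int) (out : List String) : Decidable (Spec_partition_gen n m out) := by unfold Spec_partition_gen; infer_instance

-- ===== CLAIM (what is proved, stated in full; the proofs are below) =====
def Claim_equal_partition_gen : Prop := ∀ (n : Int) (m : Int), Dom_partition_gen n m → Pre_partition_gen n m → Spec_partition_gen n m (partition_gen n m)

-- ===== LEMMAS AND PROOFS =====

-- the accumulator of B's loop is only ever appended to
theorem pvFirstLoop_acc (fuel : Nat) : ∀ (n m : Int) (s : String),
    pvFirstLoop fuel n m s = s ++ pvFirstLoop fuel n m "" := by
  induction fuel with
  | zero => intro n m s; simp [pvFirstLoop]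
  | succ f ih =>
    intro n m s
    simp only [pvFirstLoop]
    by_cases h : n > m
    · simp only [if_pos h]
      rw [ih (n - m) m (s ++ PySem.Int.toStr (n - m)),
          ih (n - m) m ("" ++ PySem.Int.toStr (n - m))]
      simp [String.append_assoc]
    · simp [if_neg h]

-- B's loop result does not depend on the fuel once the fuel is large enough
theorem pvFirstLoop_fuel (fuel : Nat) : ∀ (fuel' : Nat) (n m : Int) (s : String),
    0 < m → n.toNat ≤ fuel → n.toNat ≤ fuel' →
    pvFirstLoop fuel n m s = pvFirstLoop fuel' n m s := by
  induction fuel with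
  | zero =>
    intro f' n m s hm h h'
    have hnm : ¬ n > m := by omega
    cases f' with
    | zero => rfl
    | succ f' => simp [pvFirstLoop, if_neg hnm]
  | succ f ih =>
    intro f' n m s hm h h'
    by_cases hnm : n > m
    · have hn2 : 2 ≤ n := by omega
      cases f' with
      | zero => omega
      | succ f' =>
        simp only [pvFirstLoop, if_pos hnm]
        exact ih f' (n - m) m _ hm (by omega) (by omega)
    · cases f' with
      | zero => simp [pvFirstLoop, if_neg hnm]
      | succ f' => simp [pvFirstLoop, if_neg hnm]

-- unfolding B's helper by one loop step / at exit
theorem pvFirstB_gt {n m : Int} (hm : 0 < m) (h : n > m) :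
    pvFirstB n m = PySem.Int.toStr (n - m) ++ pvFirstB (n - m) m := by
  unfold pvFirstB
  have hn : n.toNat = (n.toNat - 1) + 1 := by omega
  rw [hn]
  simp only [pvFirstLoop, if_pos h]
  rw [pvFirstLoop_acc]
  rw [pvFirstLoop_fuel (n.toNat - 1) (n - m).toNat (n - m) m "" hm (by omega) (by omega)]
  simp

theorem pvFirstB_le {n m : Int} (h : ¬ n > m) : pvFirstB n m = PySem.Int.toStr n := by
  unfold pvFirstB
  cases hn : n.toNat with
  | zero => simp [pvFirstLoop]
  | succ k => simp [pvFirstLoop, if_neg h]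

-- main helper equivalence: A's lazy first-yield equals B's loop, for any sufficient fuel
theorem pvFirst_eq (fuel : Nat) : ∀ (n m : Int), 0 < n → 0 < m → (n + m).toNat ≤ fuel →
    pvFirstA fuel n m = pvFirstB n m := by
  induction fuel with
  | zero => intro n m hn hm h; omega
  | succ f ih =>
    intro n m hn hm h
    simp only [pvFirstA]
    by_cases he : n = m
    · rw [if_pos he, pvFirstB_le (by omega)]
    · rw [if_neg he]
      by_cases hgt : n - m > 0
      · rw [if_pos hgt, pvFirstB_gt (n := n) (m := m) hm (by omega),
            ih (n - m) m (by omega) hm (by omega)]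
      · rw [if_neg hgt, ih n (m - 1) hn (by omega) (by omega),
            pvFirstB_le (by omega)]
        -- pvFirstB n (m-1): n ≤ m - 1 as well, both sides are str(n)
        rw [pvFirstB_le (by omega)]

-- ===== VERDICT (by name: the statement is the Claim_ definition above) =====
theorem partition_gen_spec : Claim_equal_partition_gen := by
  intro n m _ hpre
  obtain ⟨hn, hm⟩ := hpre
  unfold Spec_partition_gen partition_gen partition_gen_alt
  simp only []
  simp only [show (n = m) ↔ (n - m = 0) from by omega]
  by_cases h2 : n - m > 0
  · by_cases h3 : m > 1
    · rw [pvFirst_eq _ (n - m) m (by omega) hm (by omega),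
          pvFirst_eq _ n (m - 1) hn (by omega) (by omega)]
    · rw [if_neg h3, if_neg h3, pvFirst_eq _ (n - m) m (by omega) hm (by omega)]
  · by_cases h3 : m > 1
    · rw [if_neg h2, if_neg h2, pvFirst_eq _ n (m - 1) hn (by omega) (by omega)]
    · have h2' : ¬ m < n := by omega
      simp [if_neg h2', if_neg h3]
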